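-- pv_equiv track=rewrite | github.com/BeauConstrictor/time2code.today | my-own-pace/pi.py | ansii_verify_approx
-- ===== SOURCE A (Python) =====
-- def ansii_verify_approx(approx_pi: str, pi: str, incorrect_digits: int) -> tuple[str, int]:
--     output = "\033[1;32m"
--     correct_characters = 0
--
--     for i, c in enumerate(approx_pi):
--         if i >= len(pi):
--             output += "\033[0m"
--             output += approx_pi[correct_characters:]
--             break
--         reference_c = pi[i]
--         if c == reference_c:
--             output += reference_c
--             correct_characters += 1
--         else:
--             output += f"\033[0m\033[0;31m"
--             output += approx_pi[correct_characters:]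
--             output += "\033[0m"
--             break
--
--     return output, correct_characters
-- ===== SOURCE B (Python) =====
-- def ansii_verify_approx(approx_pi: str, pi: str, incorrect_digits: int) -> tuple[str, int]:
--     # find the common-prefix length first, then assemble the output in one go
--     cp = 0
--     for a, b in zip(approx_pi, pi):
--         if a != b:
--             break
--         cp += 1
--     output = "\033[1;32m" + approx_pi[:cp]
--     if cp == len(approx_pi):          # everything matched: no reset at all
--         return output, cp
--     if cp == len(pi):                 # ran off the reference's end
--         return output + "\033[0m" + approx_pi[cp:], cp
--     return output + "\033[0m\033[0;31m" + approx_pi[cp:] + "\033[0m", cp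
-- ===== Notes on version B (the rewrite author's own statement) =====
-- stated objective: simpler
-- what changed: B first computes the common-prefix length with a single zip scan and then assembles the colored string in one of three explicit cases, instead of A's loop that interleaves comparison with repeated string concatenation and breaks mid-loop.
import Mathlib
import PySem

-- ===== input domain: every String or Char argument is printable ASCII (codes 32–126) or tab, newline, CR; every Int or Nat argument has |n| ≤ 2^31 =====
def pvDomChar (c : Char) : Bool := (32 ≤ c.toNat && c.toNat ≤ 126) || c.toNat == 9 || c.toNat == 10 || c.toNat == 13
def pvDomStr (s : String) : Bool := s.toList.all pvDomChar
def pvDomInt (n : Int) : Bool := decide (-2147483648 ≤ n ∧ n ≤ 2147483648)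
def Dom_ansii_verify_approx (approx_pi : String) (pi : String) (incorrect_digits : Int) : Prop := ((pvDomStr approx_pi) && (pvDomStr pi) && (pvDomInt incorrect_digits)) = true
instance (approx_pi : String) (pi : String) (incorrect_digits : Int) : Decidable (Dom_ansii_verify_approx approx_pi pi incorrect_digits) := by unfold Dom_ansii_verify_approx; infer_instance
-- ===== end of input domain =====

-- B computes the common-prefix length first and assembles the colored string afterwards,
-- instead of A's loop that interleaves comparison and concatenation; objective: simpler.

def pvGreen : List Char := ['\x1b', '[', '1', ';', '3', '2', 'm']
def pvReset : List Char := ['\x1b', '[', '0', 'm']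
def pvRed : List Char := ['\x1b', '[', '0', ';', '3', '1', 'm']

-- ===== PORT A =====
-- A's for-loop over enumerate(approx_pi) with early break; state = (i, output, correct_characters).
-- approx_pi[correct_characters:]: correct_characters is always ≥ 0 here, so the Python slice
-- is exactly List.drop correct_characters.toNat; pi[i] is guarded by i < len(pi), so getD is exact.
def pvALoop (approxFull piFull : List Char) : List Char → Nat → List Char → Int → (List Char × Int)
  | [], _, out, corr => (out, corr)
  | c :: rest, i, out, corr =>
    if (i : Int) ≥ (piFull.length : Int) then
      (out ++ pvReset ++ approxFull.drop corr.toNat, corr)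
    else
      let reference_c := piFull.getD i ' '
      if c = reference_c then
        pvALoop approxFull piFull rest (i + 1) (out ++ [reference_c]) (corr + 1)
      else
        (out ++ pvReset ++ pvRed ++ approxFull.drop corr.toNat ++ pvReset, corr)

def ansii_verify_approx (approx_pi : String) (pi : String) (incorrect_digits : Int) : String × Int :=
  let r := pvALoop approx_pi.toList pi.toList approx_pi.toList 0 pvGreen 0
  (String.ofList r.1, r.2)

-- ===== PORT B =====
-- common-prefix length of two char lists (B's zip loop with break)
def pvCpl : List Char → List Char → Nat
  | a :: as, b :: bs => if a = b then pvCpl as bs + 1 else 0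
  | _, _ => 0

def ansii_verify_approx_alt (approx_pi : String) (pi : String) (incorrect_digits : Int) : String × Int :=
  let as := approx_pi.toList
  let ps := pi.toList
  let cp := pvCpl as ps
  let out := pvGreen ++ as.take cp
  if cp = as.length then (String.ofList out, (cp : Int))
  else if cp = ps.length then (String.ofList (out ++ pvReset ++ as.drop cp), (cp : Int))
  else (String.ofList (out ++ pvReset ++ pvRed ++ as.drop cp ++ pvReset), (cp : Int))

-- ===== PRECONDITION & SPEC =====
def Spec_ansii_verify_approx (approx_pi : String) (pi : String) (incorrect_digits : Int) (out : String × Int) : Prop := out = ansii_verify_approx_alt approx_pi pi incorrect_digits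
instance (approx_pi : String) (pi : String) (incorrect_digits : Int) (out : String × Int) : Decidable (Spec_ansii_verify_approx approx_pi pi incorrect_digits out) := by unfold Spec_ansii_verify_approx; infer_instance

-- ===== CLAIM (what is proved, stated in full; the proofs are below) =====
def Claim_equal_ansii_verify_approx : Prop := ∀ (approx_pi : String) (pi : String) (incorrect_digits : Int), Dom_ansii_verify_approx approx_pi pi incorrect_digits → Spec_ansii_verify_approx approx_pi pi incorrect_digits (ansii_verify_approx approx_pi pi incorrect_digits)

-- ===== LEMMAS AND PROOFS =====

theorem pvALoop_eq (approxFull piFull : List Char) :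
    ∀ (as : List Char) (n : Nat) (acc : List Char),
      as = approxFull.drop n →
      pvALoop approxFull piFull as n acc (n : Int) =
        (if pvCpl as (piFull.drop n) = as.length then
           (acc ++ as.take (pvCpl as (piFull.drop n)), ((n + pvCpl as (piFull.drop n) : Nat) : Int))
         else if pvCpl as (piFull.drop n) = (piFull.drop n).length then
           (acc ++ as.take (pvCpl as (piFull.drop n)) ++ pvReset ++
              approxFull.drop (n + pvCpl as (piFull.drop n)),
            ((n + pvCpl as (piFull.drop n) : Nat) : Int))
         else
           (acc ++ as.take (pvCpl as (piFull.drop n)) ++ pvReset ++ pvRed ++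
              approxFull.drop (n + pvCpl as (piFull.drop n)) ++ pvReset,
            ((n + pvCpl as (piFull.drop n) : Nat) : Int)))
  | [], n, acc, h => by
      simp [pvALoop, pvCpl]
  | c :: rest, n, acc, h => by
      have hn : n < approxFull.length := by
        by_contra hge
        have hnil : approxFull.drop n = [] := List.drop_eq_nil_of_le (by omega)
        rw [hnil] at h
        exact List.cons_ne_nil c rest h
      by_cases hpi : piFull.length ≤ n
      · -- ran off the end of pi
        have hped : piFull.drop n = [] := List.drop_eq_nil_of_le hpi
        have hguard : ((n : Int) ≥ (piFull.length : Int)) := by exact_mod_cast hpi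
        rw [pvALoop, if_pos hguard, hped]
        have hk : pvCpl (c :: rest) ([] : List Char) = 0 := rfl
        rw [hk]
        have h1 : ¬ ((0 : Nat) = (c :: rest).length) := by simp
        have h2 : ((0 : Nat) = ([] : List Char).length) := rfl
        rw [if_neg h1, if_pos h2]
        have ht : Int.toNat ((n : Nat) : Int) = n := Int.toNat_natCast n
        rw [ht]
        simp
      · have hpi' : n < piFull.length := by omega
        have hguard : ¬ ((n : Int) ≥ (piFull.length : Int)) := by
          exact_mod_cast hpi
        have hped : piFull.drop n = piFull[n] :: piFull.drop (n + 1) :=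
          List.drop_eq_getElem_cons hpi'
        have hgd : piFull.getD n ' ' = piFull[n] := List.getD_eq_getElem piFull ' ' hpi'
        rw [pvALoop, if_neg hguard]
        simp only [hgd]
        by_cases hc : c = piFull[n]
        · -- characters match: recurse
          rw [if_pos hc]
          have hrest : rest = approxFull.drop (n + 1) := by
            have hd : (approxFull.drop n).drop 1 = approxFull.drop (n + 1) :=
              List.drop_drop (j := n) (i := 1)
            rw [← h] at hd
            simpa using hd
          have hcast : ((n : Int) + 1) = ((n + 1 : Nat) : Int) := by push_cast; ring
          rw [hcast, pvALoop_eq approxFull piFull rest (n + 1) (acc ++ [piFull[n]]) hrest]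
          set k' := pvCpl rest (piFull.drop (n + 1)) with hk'
          have hk : pvCpl (c :: rest) (piFull.drop n) = k' + 1 := by
            rw [hped]
            simp [pvCpl, hc, hk']
          rw [hk]
          have e1 : ((k' + 1 = (c :: rest).length) ↔ (k' = rest.length)) := by simp
          have e2 : ((k' + 1 = (piFull.drop n).length) ↔ (k' = (piFull.drop (n + 1)).length)) := by
            rw [hped]; simp only [List.length_cons]; omega
          have htake : (c :: rest).take (k' + 1) = c :: rest.take k' := List.take_succ_cons
          have hnk : n + (k' + 1) = n + 1 + k' := by omega
          by_cases h1 : k' = rest.length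
          · rw [if_pos h1, if_pos (e1.mpr h1), htake, hc]
            simp
            omega
          · rw [if_neg h1, if_neg (fun hx => h1 (e1.mp hx))]
            by_cases h2 : k' = (piFull.drop (n + 1)).length
            · rw [if_pos h2, if_pos (e2.mpr h2), htake, hc, hnk]
              simp
            · rw [if_neg h2, if_neg (fun hx => h2 (e2.mp hx)), htake, hc, hnk]
              simp
        · -- mismatch: break
          rw [if_neg hc]
          have hk : pvCpl (c :: rest) (piFull.drop n) = 0 := by
            rw [hped]; simp [pvCpl, hc]
          rw [hk]
          have h1 : ¬ ((0 : Nat) = (c :: rest).length) := by simp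
          have h2 : ¬ ((0 : Nat) = (piFull.drop n).length) := by
            rw [hped]; simp only [List.length_cons]; omega
          rw [if_neg h1, if_neg h2]
          have ht : Int.toNat ((n : Nat) : Int) = n := Int.toNat_natCast n
          rw [ht]
          simp

theorem ansii_verify_approx_eq_alt (approx_pi pi : String) (incorrect_digits : Int) :
    ansii_verify_approx approx_pi pi incorrect_digits = ansii_verify_approx_alt approx_pi pi incorrect_digits := by
  unfold ansii_verify_approx ansii_verify_approx_alt
  have h0 : approx_pi.toList = approx_pi.toList.drop 0 := by simp
  have hmain := pvALoop_eq approx_pi.toList pi.toList approx_pi.toList 0 pvGreen h0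
  simp only [Nat.cast_zero, List.drop_zero, Nat.zero_add] at hmain
  rw [hmain]
  dsimp only
  split_ifs <;> rfl

-- ===== VERDICT (by name: the statement is the Claim_ definition above) =====
theorem ansii_verify_approx_spec : Claim_equal_ansii_verify_approx := by
  intro approx_pi pi incorrect_digits _
  exact ansii_verify_approx_eq_alt approx_pi pi incorrect_digits
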